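-- pv_equiv track=rewrite | github.com/lghuy05/myleetcode | python/contest6.py | solve
-- ===== SOURCE A (Python) =====
-- def solve(nums):
--     n = len(nums)
--     if n <= 1:
--         return n
--
--     # --- Forward Pass ---
--     # inc[i]: max len ending at i, last step was UP
--     # dec[i]: max len ending at i, last step was DOWN
--     inc = [1] * n
--     dec = [1] * n
--
--     ans = 1  # Track max length without removal
--
--     for i in range(1, n):
--         if nums[i] > nums[i - 1]:
--             inc[i] = dec[i - 1] + 1
--         elif nums[i] < nums[i - 1]:
--             dec[i] = inc[i - 1] + 1
--         ans = max(ans, inc[i], dec[i])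
--
--     # --- Backward Pass ---
--     # r_inc[i]: max len starting at i, next step is UP (nums[i] < nums[i+1])
--     # r_dec[i]: max len starting at i, next step is DOWN (nums[i] > nums[i+1])
--     r_inc = [1] * n
--     r_dec = [1] * n
--
--     for i in range(n - 2, -1, -1):
--         if nums[i] < nums[i + 1]:
--             r_inc[i] = r_dec[i + 1] + 1
--         elif nums[i] > nums[i + 1]:
--             r_dec[i] = r_inc[i + 1] + 1
--
--     # --- Check Removals ---
--     for i in range(1, n - 1):
--         # If we remove i, we check connection between i-1 and i+1
--
--         # Scenario 1: The connection is an UP step (i-1 < i+1)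
--         # The left side must have ended with DOWN (dec[i-1])
--         # The right side must start with DOWN (r_dec[i+1]) to maintain pattern
--         if nums[i - 1] < nums[i + 1]:
--             ans = max(ans, dec[i - 1] + r_dec[i + 1])
--
--         # Scenario 2: The connection is a DOWN step (i-1 > i+1)
--         # The left side must have ended with UP (inc[i-1])
--         # The right side must start with UP (r_inc[i+1])
--         if nums[i - 1] > nums[i + 1]:
--             ans = max(ans, inc[i - 1] + r_inc[i + 1])
--
--     return ans
-- ===== SOURCE B (Python) =====
-- def solve(nums):
--     n = len(nums)
--     if n <= 1:
--         return n
--     up = dn = upd = dnd = 1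
--     pup = pdn = 1
--     best = 1
--     for i in range(1, n):
--         x, p = nums[i], nums[i - 1]
--         if x > p:
--             nup, ndn, nupd, ndnd = dn + 1, 1, dnd + 1, 1
--         elif x < p:
--             nup, ndn, nupd, ndnd = 1, up + 1, 1, upd + 1
--         else:
--             nup = ndn = nupd = ndnd = 1
--         if i >= 2:
--             q = nums[i - 2]
--             if x > q:
--                 nupd = max(nupd, pdn + 1)
--             if x < q:
--                 ndnd = max(ndnd, pup + 1)
--         best = max(best, nup, ndn, nupd, ndnd)
--         pup, pdn, up, dn = up, dn, nup, ndn
--         upd, dnd = nupd, ndnd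
--     return best
-- ===== Notes on version B (the rewrite author's own statement) =====
-- stated objective: alternative
-- what changed: Replaced A's three passes over three auxiliary arrays (forward DP, backward DP, then a combine loop over removal positions) by a single forward pass in O(1) extra space that maintains four running states: longest alternating run ending here with last step up/down, without and with one deletion spent (the deletion states are fed by bridging nums[i-2] to nums[i]).
import Mathlib
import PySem

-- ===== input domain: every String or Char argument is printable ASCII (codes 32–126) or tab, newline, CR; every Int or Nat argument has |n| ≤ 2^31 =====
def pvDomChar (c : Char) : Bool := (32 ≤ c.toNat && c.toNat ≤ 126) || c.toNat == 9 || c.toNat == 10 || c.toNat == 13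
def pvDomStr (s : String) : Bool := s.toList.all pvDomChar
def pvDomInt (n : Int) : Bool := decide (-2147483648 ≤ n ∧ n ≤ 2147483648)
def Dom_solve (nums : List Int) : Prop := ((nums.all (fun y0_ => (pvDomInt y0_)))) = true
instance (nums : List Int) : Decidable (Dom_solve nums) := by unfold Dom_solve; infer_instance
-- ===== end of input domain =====

-- B replaces A's three passes over four auxiliary arrays (forward DP, backward DP, combine over removal
-- positions) by a single forward pass in O(1) extra space maintaining four running states (alternative algorithm).

-- ===== PORT A =====
-- Port notes: every list index A uses is in range, so nums[i] is ported as nums.getD i 0 (exact here);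
-- the Python arrays inc/dec/r_inc/r_dec are modelled as functions Nat → Int (initially constant 1, i.e. [1]*n)
-- with Function.update for the assignment arr[i] = v.

-- forward pass, state after iterations i = 1..m: (inc, dec, ans); at iteration i = m+1, nums[i-1] = a m
def fwdLoopA (a : Nat → Int) : Nat → (Nat → Int) × (Nat → Int) × Int
  | 0 => (fun _ => 1, fun _ => 1, 1)
  | m+1 =>
    let s := fwdLoopA a m
    let p :=
      if a (m+1) > a m then (Function.update s.1 (m+1) (s.2.1 m + 1), s.2.1)
      else if a (m+1) < a m then (s.1, Function.update s.2.1 (m+1) (s.1 m + 1))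
      else (s.1, s.2.1)
    (p.1, p.2, max (max s.2.2 (p.1 (m+1))) (p.2 (m+1)))

-- backward pass, fuel k counts iterations done: i runs n-2, n-3, …; at fuel k+1 the index is i = n-2-k
def bwdLoopA (a : Nat → Int) (n : Nat) : Nat → (Nat → Int) × (Nat → Int)
  | 0 => (fun _ => 1, fun _ => 1)
  | k+1 =>
    let s := bwdLoopA a n k
    if a (n-2-k) < a (n-2-k+1) then (Function.update s.1 (n-2-k) (s.2 (n-2-k+1) + 1), s.2)
    else if a (n-2-k) > a (n-2-k+1) then (s.1, Function.update s.2 (n-2-k) (s.1 (n-2-k+1) + 1))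
    else s

-- removal loop, value after iterations i = 1..m; at iteration i = m+1, nums[i-1] = a m, nums[i+1] = a (m+2)
def remLoopA (a : Nat → Int) (inc dec rinc rdec : Nat → Int) (ans : Int) : Nat → Int
  | 0 => ans
  | m+1 =>
    let v := remLoopA a inc dec rinc rdec ans m
    let v1 := if a m < a (m+2) then max v (dec m + rdec (m+2)) else v
    if a m > a (m+2) then max v1 (inc m + rinc (m+2)) else v1

def solve (nums : List Int) : Int :=
  let n := nums.length
  if n ≤ 1 then (n : Int) else
    let a : Nat → Int := fun i => nums.getD i 0
    let f := fwdLoopA a (n-1)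
    let b := bwdLoopA a n (n-1)
    remLoopA a f.1 f.2.1 b.1 b.2 f.2.2 (n-2)

-- ===== PORT B =====
-- One pass, state after iterations i = 1..m: (pup, pdn, up, dn, upd, dnd, best);
-- at iteration i = m+1, nums[i-1] = a m and nums[i-2] = a (m-1) (read only when 2 ≤ i = m+1).
def altLoopB (a : Nat → Int) : Nat → Int × Int × Int × Int × Int × Int × Int
  | 0 => (1, 1, 1, 1, 1, 1, 1)
  | m+1 =>
    let s := altLoopB a m
    let t : Int × Int × Int × Int :=
      if a (m+1) > a m then (s.2.2.2.1 + 1, 1, s.2.2.2.2.2.1 + 1, 1)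
      else if a (m+1) < a m then (1, s.2.2.1 + 1, 1, s.2.2.2.2.1 + 1)
      else (1, 1, 1, 1)
    let nupd := if 2 ≤ m+1 ∧ a (m+1) > a (m-1) then max t.2.2.1 (s.2.1 + 1) else t.2.2.1
    let ndnd := if 2 ≤ m+1 ∧ a (m+1) < a (m-1) then max t.2.2.2 (s.1 + 1) else t.2.2.2
    let best := max (max (max (max s.2.2.2.2.2.2 t.1) t.2.1) nupd) ndnd
    (s.2.2.1, s.2.2.2.1, t.1, t.2.1, nupd, ndnd, best)

def solve_alt (nums : List Int) : Int :=
  let n := nums.length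
  if n ≤ 1 then (n : Int) else
    (altLoopB (fun i => nums.getD i 0) (n-1)).2.2.2.2.2.2

-- ===== PRECONDITION & SPEC =====
def Spec_solve (nums : List Int) (out : Int) : Prop := out = solve_alt nums
instance (nums : List Int) (out : Int) : Decidable (Spec_solve nums out) := by unfold Spec_solve; infer_instance

-- ===== CLAIM (what is proved, stated in full; the proofs are below) =====
def Claim_equal_solve : Prop := ∀ (nums : List Int), Dom_solve nums → Spec_solve nums (solve nums)

-- ===== LEMMAS AND PROOFS =====

-- Clean recursive descriptions of both computations (proof-only helpers).
-- fdC a i = (inc[i], dec[i]) of A's forward pass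
def fdC (a : Nat → Int) : Nat → Int × Int
  | 0 => (1, 1)
  | i+1 => (if a (i+1) > a i then (fdC a i).2 + 1 else 1,
            if a (i+1) < a i then (fdC a i).1 + 1 else 1)

-- udC a i = B's one-deletion states (upd, dnd) after index i
def udC (a : Nat → Int) : Nat → Int × Int
  | 0 => (1, 1)
  | i+1 =>
    (if 1 ≤ i ∧ a (i+1) > a (i-1)
       then max (if a (i+1) > a i then (udC a i).2 + 1 else 1) ((fdC a (i-1)).2 + 1)
       else (if a (i+1) > a i then (udC a i).2 + 1 else 1),
     if 1 ≤ i ∧ a (i+1) < a (i-1)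
       then max (if a (i+1) < a i then (udC a i).1 + 1 else 1) ((fdC a (i-1)).1 + 1)
       else (if a (i+1) < a i then (udC a i).1 + 1 else 1))

-- bBC a m = B's running best after index m
def bBC (a : Nat → Int) : Nat → Int
  | 0 => 1
  | i+1 => max (max (max (max (bBC a i) (fdC a (i+1)).1) (fdC a (i+1)).2) (udC a (i+1)).1) (udC a (i+1)).2

-- ansFC a m = A's ans after the forward loop up to index m
def ansFC (a : Nat → Int) : Nat → Int
  | 0 => 1
  | i+1 => max (max (ansFC a i) (fdC a (i+1)).1) (fdC a (i+1)).2

-- rrC a n k = (r_inc[n-1-k], r_dec[n-1-k]) of A's backward pass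
def rrC (a : Nat → Int) (n : Nat) : Nat → Int × Int
  | 0 => (1, 1)
  | k+1 => (if a (n-2-k) < a (n-2-k+1) then (rrC a n k).2 + 1 else 1,
            if a (n-2-k) > a (n-2-k+1) then (rrC a n k).1 + 1 else 1)

def riC (a : Nat → Int) (n : Nat) (i : Nat) : Int := (rrC a n (n-1-i)).1
def rdC (a : Nat → Int) (n : Nat) (i : Nat) : Int := (rrC a n (n-1-i)).2

-- remC a n m = A's ans after the removal loop up to i = m
def remC (a : Nat → Int) (n : Nat) : Nat → Int
  | 0 => ansFC a (n-1)
  | m+1 =>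
    let v := remC a n m
    let v1 := if a m < a (m+2) then max v ((fdC a m).2 + rdC a n (m+2)) else v
    if a m > a (m+2) then max v1 ((fdC a m).1 + riC a n (m+2)) else v1

lemma fdC_pos (a : Nat → Int) (i : Nat) : 1 ≤ (fdC a i).1 ∧ 1 ≤ (fdC a i).2 := by
  induction i with
  | zero => simp [fdC]
  | succ i ih => simp only [fdC]; constructor <;> split_ifs <;> omega

lemma rrC_pos (a : Nat → Int) (n k : Nat) : 1 ≤ (rrC a n k).1 ∧ 1 ≤ (rrC a n k).2 := by
  induction k with
  | zero => simp [rrC]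
  | succ k ih => simp only [rrC]; constructor <;> split_ifs <;> omega

lemma riC_pos (a : Nat → Int) (n i : Nat) : 1 ≤ riC a n i := (rrC_pos a n _).1
lemma rdC_pos (a : Nat → Int) (n i : Nat) : 1 ≤ rdC a n i := (rrC_pos a n _).2

lemma ansFC_pos (a : Nat → Int) (m : Nat) : 1 ≤ ansFC a m := by
  induction m with
  | zero => simp [ansFC]
  | succ m ih => exact le_max_of_le_left (le_max_of_le_left ih)

lemma ansFC_mono (a : Nat → Int) {m m' : Nat} (h : m ≤ m') : ansFC a m ≤ ansFC a m' := by
  induction m' with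
  | zero => have : m = 0 := by omega
            subst this; exact le_rfl
  | succ k ih =>
    by_cases hm : m ≤ k
    · exact (ih hm).trans (le_max_of_le_left (le_max_of_le_left le_rfl))
    · have : m = k+1 := by omega
      subst this; exact le_rfl

lemma bBC_mono (a : Nat → Int) {m m' : Nat} (h : m ≤ m') : bBC a m ≤ bBC a m' := by
  induction m' with
  | zero => have : m = 0 := by omega
            subst this; exact le_rfl
  | succ k ih =>
    by_cases hm : m ≤ k
    · exact (ih hm).trans (le_max_of_le_left (le_max_of_le_left (le_max_of_le_left (le_max_of_le_left le_rfl))))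
    · have : m = k+1 := by omega
      subst this; exact le_rfl

lemma remC_mono (a : Nat → Int) (n : Nat) {m m' : Nat} (h : m ≤ m') : remC a n m ≤ remC a n m' := by
  induction m' with
  | zero => have : m = 0 := by omega
            subst this; exact le_rfl
  | succ k ih =>
    by_cases hm : m ≤ k
    · refine (ih hm).trans ?_
      simp only [remC]
      split_ifs <;>
        first
          | exact le_rfl
          | exact le_max_of_le_left le_rfl
          | exact le_max_of_le_left (le_max_of_le_left le_rfl)
    · have : m = k+1 := by omega
      subst this; exact le_rfl

lemma fd_le_ansFC (a : Nat → Int) {i m : Nat} (h : i ≤ m) :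
    (fdC a i).1 ≤ ansFC a m ∧ (fdC a i).2 ≤ ansFC a m := by
  have base : (fdC a i).1 ≤ ansFC a i ∧ (fdC a i).2 ≤ ansFC a i := by
    cases i with
    | zero => simp [fdC, ansFC]
    | succ i =>
      exact ⟨le_max_of_le_left (le_max_of_le_right le_rfl), le_max_of_le_right le_rfl⟩
  exact ⟨base.1.trans (ansFC_mono a h), base.2.trans (ansFC_mono a h)⟩

lemma st_le_bBC (a : Nat → Int) {i m : Nat} (h : i ≤ m) :
    (fdC a i).1 ≤ bBC a m ∧ (fdC a i).2 ≤ bBC a m ∧ (udC a i).1 ≤ bBC a m ∧ (udC a i).2 ≤ bBC a m := by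
  have base : (fdC a i).1 ≤ bBC a i ∧ (fdC a i).2 ≤ bBC a i ∧
      (udC a i).1 ≤ bBC a i ∧ (udC a i).2 ≤ bBC a i := by
    cases i with
    | zero => simp [fdC, udC, bBC]
    | succ i =>
      refine ⟨le_max_of_le_left (le_max_of_le_left (le_max_of_le_left (le_max_of_le_right le_rfl))), ?_, ?_, le_max_of_le_right le_rfl⟩
      · exact le_max_of_le_left (le_max_of_le_left (le_max_of_le_right le_rfl))
      · exact le_max_of_le_left (le_max_of_le_right le_rfl)
  have hb := bBC_mono a h
  exact ⟨base.1.trans hb, base.2.1.trans hb, base.2.2.1.trans hb, base.2.2.2.trans hb⟩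

lemma ansFC_le_bBC (a : Nat → Int) (m : Nat) : ansFC a m ≤ bBC a m := by
  induction m with
  | zero => simp [ansFC, bBC]
  | succ m ih =>
    refine max_le (max_le ?_ ?_) ?_
    · exact ih.trans (bBC_mono a (Nat.le_succ m))
    · exact (st_le_bBC a (le_refl (m+1))).1
    · exact (st_le_bBC a (le_refl (m+1))).2.1

lemma riC_of_ge (a : Nat → Int) (n : Nat) {i : Nat} (h : n-1 ≤ i) :
    riC a n i = 1 ∧ rdC a n i = 1 := by
  have : n-1-i = 0 := by omega
  unfold riC rdC; rw [this]; simp [rrC]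

lemma rr_rec (a : Nat → Int) (n : Nat) {i : Nat} (h : i + 2 ≤ n) :
    riC a n i = (if a i < a (i+1) then rdC a n (i+1) + 1 else 1) ∧
    rdC a n i = (if a i > a (i+1) then riC a n (i+1) + 1 else 1) := by
  have h1 : n-1-i = (n-1-(i+1)) + 1 := by omega
  have h3 : n-2-(n-1-(i+1)) = i := by omega
  unfold riC rdC
  rw [h1]
  simp [rrC, h3]

lemma ansFC_le_remC (a : Nat → Int) (n m : Nat) : ansFC a (n-1) ≤ remC a n m := by
  have : remC a n 0 = ansFC a (n-1) := rfl
  rw [← this]; exact remC_mono a n (Nat.zero_le m)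

lemma remC_ge_combo (a : Nat → Int) (n : Nat) {j m : Nat} (h1 : 1 ≤ j) (hm : j ≤ m) :
    (a (j-1) < a (j+1) → (fdC a (j-1)).2 + rdC a n (j+1) ≤ remC a n m) ∧
    (a (j+1) < a (j-1) → (fdC a (j-1)).1 + riC a n (j+1) ≤ remC a n m) := by
  obtain ⟨j', rfl⟩ : ∃ j', j = j' + 1 := ⟨j-1, by omega⟩
  have hstep : (a j' < a (j'+2) → (fdC a j').2 + rdC a n (j'+2) ≤ remC a n (j'+1)) ∧
      (a (j'+2) < a j' → (fdC a j').1 + riC a n (j'+2) ≤ remC a n (j'+1)) := by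
    constructor <;> intro hlt <;> simp only [remC] <;> split_ifs <;>
      first
        | omega
        | exact le_max_of_le_right le_rfl
        | exact le_max_of_le_left (le_max_of_le_right le_rfl)
  have hmono := remC_mono a n hm
  simp only [Nat.add_sub_cancel]
  exact ⟨fun h => ((hstep.1 h).trans hmono), fun h => ((hstep.2 h).trans hmono)⟩

-- a plain alternating run extended maximally to the right is counted in A's answer
lemma run_le_remC (a : Nat → Int) (n : Nat) (hn : 2 ≤ n) :
    ∀ k, k ≤ n-1 → ∀ j, j = n-1-k →
      (fdC a j).1 + rdC a n j - 1 ≤ remC a n (n-2) ∧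
      (fdC a j).2 + riC a n j - 1 ≤ remC a n (n-2) := by
  intro k
  induction k with
  | zero =>
    intro _ j hj
    have hj' : j = n-1 := by omega
    obtain ⟨h1, h2⟩ := riC_of_ge a n (le_of_eq hj'.symm)
    rw [h1, h2]
    have hf := fd_le_ansFC a (le_of_eq hj')
    have := ansFC_le_remC a n (n-2)
    omega
  | succ k ih =>
    intro hk j hj
    have hj1 : j + 1 = n-1-k := by omega
    have h2 : j + 2 ≤ n := by omega
    obtain ⟨hri, hrd⟩ := rr_rec a n h2
    have IH := ih (by omega) (j+1) (by omega)
    have hfle := fd_le_ansFC a (show j ≤ n-1 by omega)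
    have hansle := ansFC_le_remC a n (n-2)
    rcases lt_trichotomy (a j) (a (j+1)) with h | h | h
    · rw [hri, hrd, if_pos h, if_neg (show ¬ a j > a (j+1) by omega)]
      constructor
      · omega
      · have hfd : (fdC a (j+1)).1 = (fdC a j).2 + 1 := by
          simp [fdC, if_pos h]
        omega
    · rw [hri, hrd, if_neg (show ¬ a j < a (j+1) by omega), if_neg (show ¬ a j > a (j+1) by omega)]
      omega
    · rw [hri, hrd, if_neg (show ¬ a j < a (j+1) by omega), if_pos h]
      constructor
      · have hfd : (fdC a (j+1)).2 = (fdC a j).1 + 1 := by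
          simp [fdC, if_pos h]
        omega
      · omega

lemma run_le_remC' (a : Nat → Int) (n : Nat) (hn : 2 ≤ n) {j : Nat} (hj : j ≤ n-1) :
    (fdC a j).1 + rdC a n j - 1 ≤ remC a n (n-2) ∧
    (fdC a j).2 + riC a n j - 1 ≤ remC a n (n-2) :=
  run_le_remC a n hn (n-1-j) (by omega) j (by omega)

-- direction B ≤ A: each deletion state extended maximally is bounded by A's answer
lemma ud_le_remC (a : Nat → Int) (n : Nat) (hn : 2 ≤ n) :
    ∀ i, i ≤ n-1 →
      (udC a i).1 + rdC a n i - 1 ≤ remC a n (n-2) ∧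
      (udC a i).2 + riC a n i - 1 ≤ remC a n (n-2) := by
  intro i
  induction i with
  | zero =>
    intro _
    have h := run_le_remC' a n hn (j := 0) (by omega)
    simp only [udC, fdC] at *
    omega
  | succ i ih =>
    intro hi
    have IH := ih (by omega)
    have h2 : i + 2 ≤ n := by omega
    obtain ⟨hri, hrd⟩ := rr_rec a n h2
    have hrun := run_le_remC' a n hn (j := i+1) (by omega)
    have hfd1 := fdC_pos a (i+1)
    -- bound for the no-bridge candidates of (udC a (i+1)).1 resp. .2
    have hbu : (if a (i+1) > a i then (udC a i).2 + 1 else 1) + rdC a n (i+1) - 1 ≤ remC a n (n-2) := by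
      split_ifs with hgt
      · rw [if_pos (show a i < a (i+1) by omega)] at hri; omega
      · omega
    have hbd : (if a (i+1) < a i then (udC a i).1 + 1 else 1) + riC a n (i+1) - 1 ≤ remC a n (n-2) := by
      split_ifs with hlt
      · rw [if_pos (show a i > a (i+1) by omega)] at hrd; omega
      · omega
    constructor
    · simp only [udC]
      by_cases hg : 1 ≤ i ∧ a (i+1) > a (i-1)
      · rw [if_pos hg]
        have hX : (fdC a (i-1)).2 + 1 + rdC a n (i+1) - 1 ≤ remC a n (n-2) := by
          have hcb := (remC_ge_combo a n (j := i) (m := n-2) hg.1 (by omega)).1 hg.2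
          omega
        have hm : max (if a (i+1) > a i then (udC a i).2 + 1 else 1) ((fdC a (i-1)).2 + 1)
            ≤ remC a n (n-2) - rdC a n (i+1) + 1 := max_le (by omega) (by omega)
        omega
      · rw [if_neg hg]; exact hbu
    · simp only [udC]
      by_cases hg : 1 ≤ i ∧ a (i+1) < a (i-1)
      · rw [if_pos hg]
        have hX : (fdC a (i-1)).1 + 1 + riC a n (i+1) - 1 ≤ remC a n (n-2) := by
          have hcb := (remC_ge_combo a n (j := i) (m := n-2) hg.1 (by omega)).2 hg.2
          omega
        have hm : max (if a (i+1) < a i then (udC a i).1 + 1 else 1) ((fdC a (i-1)).1 + 1)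
            ≤ remC a n (n-2) - riC a n (i+1) + 1 := max_le (by omega) (by omega)
        omega
      · rw [if_neg hg]; exact hbd

lemma bBC_le_remC (a : Nat → Int) (n : Nat) (hn : 2 ≤ n) :
    ∀ m, m ≤ n-1 → bBC a m ≤ remC a n (n-2) := by
  intro m
  induction m with
  | zero =>
    intro _
    have h1 := ansFC_pos a (n-1)
    have h2 := ansFC_le_remC a n (n-2)
    simp only [bBC]; omega
  | succ m ih =>
    intro hm
    have hud := ud_le_remC a n hn (m+1) hm
    have hrd := rdC_pos a n (m+1)
    have hri := riC_pos a n (m+1)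
    have hfd := fd_le_ansFC a (show m+1 ≤ n-1 from hm)
    have hans := ansFC_le_remC a n (n-2)
    have hih := ih (by omega)
    simp only [bBC]
    refine max_le (max_le (max_le (max_le hih (by omega)) (by omega)) (by omega)) (by omega)

-- direction A ≤ B: each deletion state extended maximally is reached by B's running best
lemma ud_run_le_bBC (a : Nat → Int) (n : Nat) (hn : 2 ≤ n) :
    ∀ k, k ≤ n-1 → ∀ j, j = n-1-k →
      (udC a j).1 + rdC a n j - 1 ≤ bBC a (n-1) ∧
      (udC a j).2 + riC a n j - 1 ≤ bBC a (n-1) := by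
  intro k
  induction k with
  | zero =>
    intro _ j hj
    have hj' : j = n-1 := by omega
    obtain ⟨h1, h2⟩ := riC_of_ge a n (le_of_eq hj'.symm)
    rw [h1, h2]
    have := st_le_bBC a (le_of_eq hj')
    omega
  | succ k ih =>
    intro hk j hj
    have hj1 : j + 1 = n-1-k := by omega
    have h2 : j + 2 ≤ n := by omega
    obtain ⟨hri, hrd⟩ := rr_rec a n h2
    have IH := ih (by omega) (j+1) (by omega)
    have hst := st_le_bBC a (show j ≤ n-1 by omega)
    constructor
    · rw [hrd]
      split_ifs with h
      · -- a j > a (j+1): B's state dnd at j+1 is at least (udC j).1 + 1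
        have hd : (udC a j).1 + 1 ≤ (udC a (j+1)).2 := by
          simp only [udC]
          rw [if_pos (by omega : a (j+1) < a j)]
          split_ifs with hg
          · exact le_max_of_le_left le_rfl
          · exact le_rfl
        omega
      · omega
    · rw [hri]
      split_ifs with h
      · have hd : (udC a j).2 + 1 ≤ (udC a (j+1)).1 := by
          simp only [udC]
          rw [if_pos (by omega : a (j+1) > a j)]
          split_ifs with hg
          · exact le_max_of_le_left le_rfl
          · exact le_rfl
        omega
      · omega

lemma ud_run_le_bBC' (a : Nat → Int) (n : Nat) (hn : 2 ≤ n) {j : Nat} (hj : j ≤ n-1) :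
    (udC a j).1 + rdC a n j - 1 ≤ bBC a (n-1) ∧
    (udC a j).2 + riC a n j - 1 ≤ bBC a (n-1) :=
  ud_run_le_bBC a n hn (n-1-j) (by omega) j (by omega)

lemma remC_le_bBC (a : Nat → Int) (n : Nat) (hn : 2 ≤ n) :
    ∀ m, m ≤ n-2 → remC a n m ≤ bBC a (n-1) := by
  intro m
  induction m with
  | zero =>
    intro _
    exact (ansFC_le_bBC a (n-1))
  | succ m ih =>
    intro hm
    have hih := ih (by omega)
    -- the up-bridge combo at deletion position m+1 is dominated by B's state upd at m+2
    have hup : a m < a (m+2) → (fdC a m).2 + rdC a n (m+2) ≤ bBC a (n-1) := by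
      intro hlt
      have hbr : (fdC a m).2 + 1 ≤ (udC a (m+2)).1 := by
        show (fdC a m).2 + 1 ≤ (udC a ((m+1)+1)).1
        simp only [udC]
        rw [if_pos (show 1 ≤ m+1 ∧ a (m+1+1) > a (m+1-1) from ⟨by omega, hlt⟩)]
        exact le_max_right _ _
      have hD := (ud_run_le_bBC' a n hn (j := m+2) (by omega)).1
      omega
    have hdn : a (m+2) < a m → (fdC a m).1 + riC a n (m+2) ≤ bBC a (n-1) := by
      intro hlt
      have hbr : (fdC a m).1 + 1 ≤ (udC a (m+2)).2 := by
        show (fdC a m).1 + 1 ≤ (udC a ((m+1)+1)).2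
        simp only [udC]
        rw [if_pos (show 1 ≤ m+1 ∧ a (m+1+1) < a (m+1-1) from ⟨by omega, hlt⟩)]
        exact le_max_right _ _
      have hD := (ud_run_le_bBC' a n hn (j := m+2) (by omega)).2
      omega
    simp only [remC]
    split_ifs with h1 h2 h2
    · exact max_le (max_le hih (hup h2)) (hdn h1)
    · exact max_le hih (hdn h1)
    · exact max_le hih (hup h2)
    · exact hih

lemma main_eq (a : Nat → Int) (n : Nat) (hn : 2 ≤ n) :
    remC a n (n-2) = bBC a (n-1) :=
  le_antisymm (remC_le_bBC a n hn (n-2) le_rfl) (bBC_le_remC a n hn (n-1) le_rfl)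

-- ===== port ↔ clean correspondence =====
lemma fwd_eq (a : Nat → Int) :
    ∀ m, (∀ j, j ≤ m → (fwdLoopA a m).1 j = (fdC a j).1 ∧ (fwdLoopA a m).2.1 j = (fdC a j).2) ∧
         (∀ j, m < j → (fwdLoopA a m).1 j = 1 ∧ (fwdLoopA a m).2.1 j = 1) ∧
         (fwdLoopA a m).2.2 = ansFC a m := by
  intro m
  induction m with
  | zero =>
    refine ⟨?_, ?_, rfl⟩
    · intro j hj
      obtain rfl : j = 0 := by omega
      exact ⟨rfl, rfl⟩
    · intro j hj
      exact ⟨rfl, rfl⟩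
  | succ m ih =>
    obtain ⟨ih1, ih2, ih3⟩ := ih
    rcases lt_trichotomy (a (m+1)) (a m) with h | h | h
    · have hni : ¬ a (m+1) > a m := by omega
      simp only [fwdLoopA, if_neg hni, if_pos h]
      refine ⟨?_, ?_, ?_⟩
      · intro j hj
        by_cases hje : j = m+1
        · subst hje
          constructor
          · rw [(ih2 (m+1) (by omega)).1]
            simp [fdC, if_neg hni]
          · rw [Function.update_self, (ih1 m le_rfl).1]
            simp [fdC, if_pos h]
        · have hjm : j ≤ m := by omega
          exact ⟨(ih1 j hjm).1, by rw [Function.update_of_ne hje, (ih1 j hjm).2]⟩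
      · intro j hj
        have hj' : m < j := by omega
        have hne : j ≠ m+1 := by omega
        exact ⟨(ih2 j hj').1, by rw [Function.update_of_ne hne, (ih2 j hj').2]⟩
      · rw [ih3, (ih2 (m+1) (by omega)).1, Function.update_self, (ih1 m le_rfl).1]
        simp only [ansFC, fdC, if_neg hni, if_pos h]
    · have hni : ¬ a (m+1) > a m := by omega
      have hni' : ¬ a (m+1) < a m := by omega
      simp only [fwdLoopA, if_neg hni, if_neg hni']
      refine ⟨?_, ?_, ?_⟩
      · intro j hj
        by_cases hje : j = m+1
        · subst hje
          rw [(ih2 (m+1) (by omega)).1, (ih2 (m+1) (by omega)).2]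
          simp [fdC, if_neg hni, if_neg hni']
        · exact ih1 j (by omega)
      · intro j hj
        exact ih2 j (by omega)
      · rw [ih3, (ih2 (m+1) (by omega)).1, (ih2 (m+1) (by omega)).2]
        simp only [ansFC, fdC, if_neg hni, if_neg hni']
    · simp only [fwdLoopA, if_pos h]
      refine ⟨?_, ?_, ?_⟩
      · intro j hj
        by_cases hje : j = m+1
        · subst hje
          constructor
          · rw [Function.update_self, (ih1 m le_rfl).2]
            simp [fdC, if_pos h]
          · rw [(ih2 (m+1) (by omega)).2]
            simp [fdC, if_neg (show ¬ a (m+1) < a m by omega)]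
        · have hjm : j ≤ m := by omega
          exact ⟨by rw [Function.update_of_ne hje, (ih1 j hjm).1], (ih1 j hjm).2⟩
      · intro j hj
        have hj' : m < j := by omega
        have hne : j ≠ m+1 := by omega
        exact ⟨by rw [Function.update_of_ne hne, (ih2 j hj').1], (ih2 j hj').2⟩
      · rw [ih3, Function.update_self, (ih1 m le_rfl).2, (ih2 (m+1) (by omega)).2]
        simp only [ansFC, fdC, if_pos h, if_neg (show ¬ a (m+1) < a m by omega)]

lemma bwd_eq (a : Nat → Int) (n : Nat) :
    ∀ k, k ≤ n-1 →
      (∀ j, j < n-1-k → (bwdLoopA a n k).1 j = 1 ∧ (bwdLoopA a n k).2 j = 1) ∧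
      (∀ j, n-1-k ≤ j → (bwdLoopA a n k).1 j = riC a n j ∧ (bwdLoopA a n k).2 j = rdC a n j) := by
  intro k
  induction k with
  | zero =>
    intro _
    refine ⟨fun j hj => ⟨rfl, rfl⟩, fun j hj => ?_⟩
    obtain ⟨e1, e2⟩ := riC_of_ge a n (show n-1 ≤ j by omega)
    rw [e1, e2]
    exact ⟨rfl, rfl⟩
  | succ k ih =>
    intro hk
    obtain ⟨ih1, ih2⟩ := ih (by omega)
    have hin : (n-2-k) + 2 ≤ n := by omega
    obtain ⟨hri, hrd⟩ := rr_rec a n hin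
    have hlt : n-2-k < n-1-k := by omega
    have heq : n-2-k+1 = n-1-k := by omega
    rcases lt_trichotomy (a (n-2-k)) (a (n-2-k+1)) with h | h | h
    · simp only [bwdLoopA, if_pos h]
      constructor
      · intro j hj
        have hne : j ≠ n-2-k := by omega
        rw [Function.update_of_ne hne]
        exact ih1 j (by omega)
      · intro j hj
        by_cases hje : j = n-2-k
        · subst hje
          constructor
          · rw [Function.update_self, (ih2 (n-2-k+1) (by omega)).2, hri, if_pos h]
          · rw [(ih1 (n-2-k) hlt).2, hrd, if_neg (show ¬ a (n-2-k) > a (n-2-k+1) by omega)]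
        · have hj' : n-1-k ≤ j := by omega
          rw [Function.update_of_ne hje]
          exact ih2 j hj'
    · have h1 : ¬ a (n-2-k) < a (n-2-k+1) := by omega
      have h2 : ¬ a (n-2-k) > a (n-2-k+1) := by omega
      simp only [bwdLoopA, if_neg h1, if_neg h2]
      constructor
      · intro j hj
        exact ih1 j (by omega)
      · intro j hj
        by_cases hje : j = n-2-k
        · subst hje
          rw [(ih1 (n-2-k) hlt).1, (ih1 (n-2-k) hlt).2, hri, hrd, if_neg h1, if_neg h2]
          exact ⟨rfl, rfl⟩
        · exact ih2 j (by omega)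
    · have h1 : ¬ a (n-2-k) < a (n-2-k+1) := by omega
      simp only [bwdLoopA, if_neg h1, if_pos h]
      constructor
      · intro j hj
        have hne : j ≠ n-2-k := by omega
        rw [Function.update_of_ne hne]
        exact ih1 j (by omega)
      · intro j hj
        by_cases hje : j = n-2-k
        · subst hje
          constructor
          · rw [(ih1 (n-2-k) hlt).1, hri, if_neg h1]
          · rw [Function.update_self, (ih2 (n-2-k+1) (by omega)).1, hrd, if_pos h]
        · have hj' : n-1-k ≤ j := by omega
          rw [Function.update_of_ne hje]
          exact ih2 j hj'

lemma rem_eq (a : Nat → Int) (n : Nat) (Inc Dec Ri Rd : Nat → Int) (ans0 : Int)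
    (hI : ∀ j, j ≤ n-1 → Inc j = (fdC a j).1 ∧ Dec j = (fdC a j).2)
    (hR : ∀ j, Ri j = riC a n j ∧ Rd j = rdC a n j)
    (ha : ans0 = ansFC a (n-1)) :
    ∀ m, m ≤ n-2 → remLoopA a Inc Dec Ri Rd ans0 m = remC a n m := by
  intro m
  induction m with
  | zero =>
    intro _
    simpa [remLoopA, remC] using ha
  | succ m ih =>
    intro hm
    simp only [remLoopA, remC]
    rw [ih (by omega), (hI m (by omega)).1, (hI m (by omega)).2, (hR (m+2)).1, (hR (m+2)).2]

lemma alt_eq (a : Nat → Int) :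
    ∀ m, ((altLoopB a m).2.2.1 = (fdC a m).1 ∧ (altLoopB a m).2.2.2.1 = (fdC a m).2 ∧
          (altLoopB a m).2.2.2.2.1 = (udC a m).1 ∧ (altLoopB a m).2.2.2.2.2.1 = (udC a m).2 ∧
          (altLoopB a m).2.2.2.2.2.2 = bBC a m) ∧
         (1 ≤ m → (altLoopB a m).1 = (fdC a (m-1)).1 ∧ (altLoopB a m).2.1 = (fdC a (m-1)).2) := by
  intro m
  induction m with
  | zero =>
    exact ⟨⟨rfl, rfl, rfl, rfl, rfl⟩, fun h => absurd h (by omega)⟩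
  | succ m ih =>
    obtain ⟨⟨e_up, e_dn, e_upd, e_dnd, e_best⟩, e_prev⟩ := ih
    by_cases hm : 1 ≤ m
    · obtain ⟨e_pup, e_pdn⟩ := e_prev hm
      have hgiff : ∀ X : Prop, (2 ≤ m+1 ∧ X) ↔ (1 ≤ m ∧ X) := fun X =>
        ⟨fun hx => ⟨by omega, hx.2⟩, fun hx => ⟨by omega, hx.2⟩⟩
      constructor
      · refine ⟨?_, ?_, ?_, ?_, ?_⟩ <;>
          simp only [altLoopB, fdC, udC, bBC, e_up, e_dn, e_upd, e_dnd, e_best, e_pup, e_pdn, hgiff] <;>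
          split_ifs <;> first | rfl | omega
      · intro _
        exact ⟨e_up, e_dn⟩
    · obtain rfl : m = 0 := by omega
      have hg1 : ¬ (2 ≤ 0+1) := by omega
      constructor
      · refine ⟨?_, ?_, ?_, ?_, ?_⟩ <;>
          simp only [altLoopB, fdC, udC, bBC,
            if_neg (fun hx : 2 ≤ 0+1 ∧ a (0+1) > a (0-1) => hg1 hx.1),
            if_neg (fun hx : 2 ≤ 0+1 ∧ a (0+1) < a (0-1) => hg1 hx.1),
            if_neg (fun hx : 1 ≤ 0 ∧ a (0+1) > a (0-1) => absurd hx.1 (by omega)),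
            if_neg (fun hx : 1 ≤ 0 ∧ a (0+1) < a (0-1) => absurd hx.1 (by omega))] <;>
          split_ifs <;> first | rfl | omega
      · intro _
        exact ⟨e_up, e_dn⟩

lemma solve_eq (nums : List Int) (hn : 2 ≤ nums.length) :
    solve nums = remC (fun i => nums.getD i 0) nums.length (nums.length - 2) := by
  simp only [solve]
  rw [if_neg (show ¬ nums.length ≤ 1 by omega)]
  exact rem_eq (fun i => nums.getD i 0) nums.length _ _ _ _ _
    (fun j hj => (fwd_eq _ (nums.length - 1)).1 j hj)
    (fun j => (bwd_eq _ nums.length (nums.length - 1) le_rfl).2 j (by omega))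
    ((fwd_eq _ (nums.length - 1)).2.2) (nums.length - 2) le_rfl

lemma solve_alt_eq (nums : List Int) (hn : 2 ≤ nums.length) :
    solve_alt nums = bBC (fun i => nums.getD i 0) (nums.length - 1) := by
  simp only [solve_alt]
  rw [if_neg (show ¬ nums.length ≤ 1 by omega)]
  exact ((alt_eq _ (nums.length - 1)).1).2.2.2.2

-- ===== VERDICT (by name: the statement is the Claim_ definition above) =====
theorem solve_spec : Claim_equal_solve := by
  intro nums _
  unfold Spec_solve
  by_cases h : nums.length ≤ 1
  · unfold solve solve_alt
    simp [h]
  · have h2 : 2 ≤ nums.length := by omega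
    rw [solve_eq nums h2, solve_alt_eq nums h2, main_eq _ _ h2]
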